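-- pv_equiv track=rewrite | github.com/fragosoa/interview-prep | python/coding/puzzles/encrypted_words.py | findEncryptedWord
-- ===== SOURCE A (Python) =====
-- def findEncryptedWord(s):
--     n = len(s)
--     if n <= 1:
--         return s
--     start = 0
--     end = n//2
--     if n %2 == 0:
--         end -= 1
--     left = findEncryptedWord(s[start:end])
--     right = findEncryptedWord(s[end+1:])
--     result = s[end] + left + right
--
--     return result
-- ===== SOURCE B (Python) =====
-- def findEncryptedWord(s):
--     res = []
--     stack = [(0, len(s))]
--     while stack:
--         lo, hi = stack.pop()
--         if hi - lo <= 0: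
--             continue
--         mid = lo + (hi - lo - 1) // 2
--         res.append(s[mid])
--         stack.append((mid + 1, hi))
--         stack.append((lo, mid))
--     return ''.join(res)
-- ===== Notes on version B (the rewrite author's own statement) =====
-- stated objective: alternative
-- what changed: A's recursion that copies two slices of the string at every call is replaced by an iterative loop over an explicit stack of (lo, hi) index ranges that appends the middle character of each popped range to one result list, so no substring is ever materialised.
import Mathlib
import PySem

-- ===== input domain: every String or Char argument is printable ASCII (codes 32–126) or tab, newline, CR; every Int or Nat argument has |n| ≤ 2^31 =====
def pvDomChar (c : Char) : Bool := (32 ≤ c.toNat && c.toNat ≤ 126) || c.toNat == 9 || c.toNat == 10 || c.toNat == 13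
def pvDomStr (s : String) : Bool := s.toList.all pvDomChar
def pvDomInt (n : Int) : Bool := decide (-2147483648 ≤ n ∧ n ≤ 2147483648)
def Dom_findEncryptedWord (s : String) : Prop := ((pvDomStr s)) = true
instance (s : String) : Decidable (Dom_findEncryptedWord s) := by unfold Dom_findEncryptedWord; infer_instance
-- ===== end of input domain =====

-- B replaces A's recursion-that-copies-two-slices-per-call by an iterative loop over an
-- explicit stack of (lo, hi) index ranges (objective: alternative decomposition; no slice copies).

-- ===== PORT A =====
-- A, step for step on the char list (PySem.Str functions are wrappers over List Char).
-- `fuel` only makes the recursion structural: it starts at len(s) and provably never runs out.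
-- `pyGetD l e ' '` ports `s[end]`: end is provably in range 0 ≤ end < n here, so the default never shows.
def pvEncAF : Nat → List Char → List Char
  | 0, l => l  -- unreachable: the fuel is ≥ l.length, and l.length = 0 forces l = [] = result
  | f + 1, l =>
    if (l.length : Int) ≤ 1 then l
    else
      let e : Int := if PySem.Int.mod (l.length : Int) 2 = 0 then PySem.Int.floordiv (l.length : Int) 2 - 1
                     else PySem.Int.floordiv (l.length : Int) 2
      let left := pvEncAF f (PySem.List.slice l (some 0) (some e))
      let right := pvEncAF f (PySem.List.slice l (some (e + 1)) none)
      PySem.List.pyGetD l e ' ' :: (left ++ right)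

def findEncryptedWord (s : String) : String := String.ofList (pvEncAF s.toList.length s.toList)

-- ===== PORT B =====
-- the while loop: stack head = top of the Python stack; res is the accumulator.
-- `fuel` only makes the loop structural: 2*len(s)+1 iterations provably suffice.
def pvLoopBF (s : List Char) : Nat → List (Nat × Nat) → List Char → List Char
  | _, [], res => res
  | 0, _, res => res  -- unreachable: the fuel bounds the number of iterations
  | f + 1, (lo, hi) :: st, res =>
    if hi - lo ≤ 0 then pvLoopBF s f st res
    else
      let mid := lo + (hi - lo - 1) / 2
      pvLoopBF s f ((lo, mid) :: (mid + 1, hi) :: st) (res ++ [s.getD mid ' '])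

def findEncryptedWord_alt (s : String) : String :=
  String.ofList (pvLoopBF s.toList (2 * s.toList.length + 1) [(0, s.toList.length)] [])

-- ===== PRECONDITION & SPEC =====
def Spec_findEncryptedWord (s : String) (out : String) : Prop := out = findEncryptedWord_alt s
instance (s : String) (out : String) : Decidable (Spec_findEncryptedWord s out) := by unfold Spec_findEncryptedWord; infer_instance

-- ===== CLAIM (what is proved, stated in full; the proofs are below) =====
def Claim_equal_findEncryptedWord : Prop := ∀ (s : String), Dom_findEncryptedWord s → Spec_findEncryptedWord s (findEncryptedWord s)

-- ===== LEMMAS AND PROOFS =====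

-- A's `end` index in Nat form
theorem pvEncA_e_eq (m : Nat) (h : 2 ≤ m) :
    (if PySem.Int.mod (m : Int) 2 = 0 then PySem.Int.floordiv (m : Int) 2 - 1
     else PySem.Int.floordiv (m : Int) 2) = (((m - 1) / 2 : Nat) : Int) := by
  rw [PySem.Int.mod_eq_emod_of_pos (by norm_num), PySem.Int.floordiv_eq_ediv_of_pos (by norm_num)]
  split <;> omega

-- any sufficient fuel computes the same value
theorem pvEncAF_congr : ∀ (f g : Nat) (l : List Char), l.length ≤ f → l.length ≤ g →
    pvEncAF f l = pvEncAF g l := by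
  intro f
  induction f using Nat.strong_induction_on with
  | _ f ih =>
    intro g l hf hg
    cases f with
    | zero =>
      have hle : l = [] := by cases l <;> simp_all
      subst hle; cases g <;> simp [pvEncAF]
    | succ f =>
      cases g with
      | zero =>
        have hle : l = [] := by cases l <;> simp_all
        subst hle; simp [pvEncAF]
      | succ g =>
        rw [pvEncAF, pvEncAF]
        by_cases h1 : (l.length : Int) ≤ 1
        · rw [if_pos h1, if_pos h1]
        · rw [if_neg h1, if_neg h1]
          have h2 : 2 ≤ l.length := by omega
          simp only [pvEncA_e_eq l.length h2]
          rw [PySem.List.slice_zero_start, PySem.List.slice_to l (Int.natCast_nonneg _)]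
          have hc : (((l.length - 1) / 2 : Nat) : Int) + 1 = (((l.length - 1) / 2 + 1 : Nat) : Int) := by
            push_cast; ring
          rw [hc, PySem.List.slice_from l (Int.natCast_nonneg _)]
          simp only [Int.toNat_natCast]
          have hlf : (l.take ((l.length - 1) / 2)).length ≤ f := by simp; omega
          have hlg : (l.take ((l.length - 1) / 2)).length ≤ g := by simp; omega
          have hrf : (l.drop ((l.length - 1) / 2 + 1)).length ≤ f := by simp; omega
          have hrg : (l.drop ((l.length - 1) / 2 + 1)).length ≤ g := by simp; omega
          rw [ih f (by omega) g _ hlf hlg, ih f (by omega) g _ hrf hrg]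

def pvEncA (l : List Char) : List Char := pvEncAF l.length l

-- A in Nat form: the Int index arithmetic collapses to (n-1)/2
theorem pvEncA_eq (l : List Char) :
    pvEncA l = if l.length ≤ 1 then l
      else (l.getD ((l.length - 1) / 2) ' ') ::
        (pvEncA (l.take ((l.length - 1) / 2)) ++ pvEncA (l.drop ((l.length - 1) / 2 + 1))) := by
  unfold pvEncA
  by_cases h : l.length ≤ 1
  · rw [if_pos h]
    cases hn : l.length with
    | zero => simp [pvEncAF]
    | succ m => rw [pvEncAF]; rw [if_pos (by omega)]
  · have h2 : 2 ≤ l.length := by omega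
    obtain ⟨m, hm⟩ : ∃ m, l.length = m + 1 := ⟨l.length - 1, by omega⟩
    rw [if_neg h]
    conv_lhs => rw [hm]
    rw [pvEncAF, if_neg (by omega)]
    simp only [pvEncA_e_eq l.length h2]
    rw [PySem.List.slice_zero_start, PySem.List.slice_to l (Int.natCast_nonneg _)]
    have hc : (((l.length - 1) / 2 : Nat) : Int) + 1 = (((l.length - 1) / 2 + 1 : Nat) : Int) := by
      push_cast; ring
    rw [hc, PySem.List.slice_from l (Int.natCast_nonneg _), PySem.List.pyGetD_natCast]
    simp only [Int.toNat_natCast]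
    rw [pvEncAF_congr m (l.take ((l.length - 1) / 2)).length _ (by simp; omega) (le_refl _),
        pvEncAF_congr m (l.drop ((l.length - 1) / 2 + 1)).length _ (by simp; omega) (le_refl _)]

theorem pvEncA_nil : pvEncA [] = [] := by
  rw [pvEncA_eq]; simp

-- one preorder step of A on a segment of s
theorem pvEncA_seg_split (s : List Char) (lo hi : Nat) (h1 : lo < hi) (h2 : hi ≤ s.length) :
    pvEncA ((s.drop lo).take (hi - lo)) =
      s.getD (lo + (hi - lo - 1) / 2) ' ' ::
        (pvEncA ((s.drop lo).take ((lo + (hi - lo - 1) / 2) - lo)) ++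
         pvEncA ((s.drop (lo + (hi - lo - 1) / 2 + 1)).take (hi - (lo + (hi - lo - 1) / 2 + 1)))) := by
  set L := (s.drop lo).take (hi - lo) with hL
  have hlen : L.length = hi - lo := by
    rw [hL]; simp; omega
  set e := (hi - lo - 1) / 2 with he
  have hei : e < hi - lo := by omega
  have hget : L.getD e ' ' = s.getD (lo + e) ' ' := by
    rw [List.getD_eq_getElem L ' ' (by omega), List.getD_eq_getElem s ' ' (by omega)]
    simp [hL]
  by_cases hone : hi - lo = 1
  · have he0 : e = 0 := by omega
    have hLs : L = [s.getD lo ' '] := by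
      apply List.ext_getElem (by simp [hlen, hone])
      intro i hi1 hi2
      have hi0 : i = 0 := by rw [hlen, hone] at hi1; omega
      subst hi0
      have h0 : L.getD 0 ' ' = s.getD (lo + 0) ' ' := by rw [← he0]; exact hget
      rw [List.getD_eq_getElem L ' ' (by omega)] at h0
      simpa using h0
    rw [pvEncA_eq, if_pos (by omega), hLs, he0]
    have hz2 : hi - (lo + 0 + 1) = 0 := by omega
    simp [hz2, pvEncA_nil]
  · have h3 : 2 ≤ hi - lo := by omega
    have ht : L.take e = (s.drop lo).take (lo + e - lo) := by
      rw [hL, List.take_take]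
      have hm : min e (hi - lo) = lo + e - lo := by omega
      rw [hm]
    have hd : L.drop (e + 1) = (s.drop (lo + e + 1)).take (hi - (lo + e + 1)) := by
      rw [hL, List.drop_take, List.drop_drop]
      have h4 : lo + (e + 1) = lo + e + 1 := by omega
      have h5 : hi - lo - (e + 1) = hi - (lo + e + 1) := by omega
      rw [h4, h5]
    rw [pvEncA_eq, if_neg (by omega), hlen, ← he, hget, ht, hd]

-- the loop measure: total pending work plus stack size; it drops with every iteration
def pvMeasure (st : List (Nat × Nat)) : Nat := (st.map (fun p => p.2 - p.1)).sum * 2 + st.length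

-- loop invariant: the stack holds the pending segments, emitted in preorder
theorem pvLoopBF_eq : ∀ (f : Nat) (s : List Char) (st : List (Nat × Nat)) (res : List Char),
    pvMeasure st ≤ f → (∀ p ∈ st, p.2 ≤ s.length) →
    pvLoopBF s f st res = res ++ (st.map (fun p => pvEncA ((s.drop p.1).take (p.2 - p.1)))).flatten := by
  intro f
  induction f with
  | zero =>
    intro s st res hf _
    have : st = [] := by cases st <;> simp_all [pvMeasure]
    subst this; simp [pvLoopBF]
  | succ f ih =>
    intro s st res hf hv
    match st with
    | [] => simp [pvLoopBF]
    | (lo, hi) :: st =>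
      rw [pvLoopBF]
      by_cases h : hi - lo ≤ 0
      · rw [if_pos h, ih s st res (by simp [pvMeasure] at hf ⊢; omega)
              (fun p hp => hv p (List.mem_cons_of_mem _ hp))]
        have h0 : hi - lo = 0 := by omega
        simp [h0, pvEncA_nil]
      · rw [if_neg h]
        have hhi : hi ≤ s.length := hv (lo, hi) (List.mem_cons_self ..)
        have hlt : lo < hi := by omega
        rw [ih s _ _ (by simp [pvMeasure] at hf ⊢; omega)]
        · simp only [List.map_cons, List.flatten_cons]
          rw [pvEncA_seg_split s lo hi hlt hhi]
          simp [List.append_assoc]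
        · intro p hp
          simp only [List.mem_cons] at hp
          rcases hp with hp | hp | hp
          · rw [hp]; simp; omega
          · rw [hp]; simpa using hhi
          · exact hv p (List.mem_cons_of_mem _ hp)

-- ===== VERDICT (by name: the statement is the Claim_ definition above) =====
theorem findEncryptedWord_spec : Claim_equal_findEncryptedWord := by
  intro s _
  unfold Spec_findEncryptedWord findEncryptedWord findEncryptedWord_alt
  rw [pvLoopBF_eq (2 * s.toList.length + 1) s.toList _ _ (by simp [pvMeasure]; omega) (by simp)]
  show String.ofList (pvEncA s.toList) = _
  rw [pvEncA]
  simp only [List.map_cons, List.map_nil, List.flatten_cons, List.flatten_nil,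
    List.append_nil, List.nil_append, List.drop_zero, Nat.sub_zero, List.take_length]
  rfl
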